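-- pv_equiv track=rewrite | github.com/stefy6667/voice_agent | app/services/telephony.py | _int_to_ro
-- ===== SOURCE A (Python) =====
-- _UNITS = ["", "unu", "doi", "trei", "patru", "cinci", "sase", "sapte", "opt", "noua",
--           "zece", "unsprezece", "doisprezece", "treisprezece", "paisprezece", "cincisprezece",
--           "saisprezece", "saptesprezece", "optsprezece", "nouasprezece"]
--
-- _TENS = ["", "", "douazeci", "treizeci", "patruzeci", "cincizeci",
--          "saizeci", "saptezeci", "optzeci", "nouazeci"]
--
-- def _int_to_ro(n: int) -> str:
--     if n < 0:
--         return "minus " + _int_to_ro(-n)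
--     if n == 0:
--         return "zero"
--     if n < 20:
--         return _UNITS[n]
--     if n < 100:
--         tens = _TENS[n // 10]
--         unit = _UNITS[n % 10]
--         return tens + (" si " + unit if unit else "")
--     if n < 1000:
--         hundreds = n // 100
--         rest = n % 100
--         h = ("o suta" if hundreds == 1 else _UNITS[hundreds] + " sute")
--         return h + (" " + _int_to_ro(rest) if rest else "")
--     if n < 1_000_000:
--         thousands = n // 1000
--         rest = n % 1000
--         t = ("o mie" if thousands == 1 else _int_to_ro(thousands) + " mii")
--         return t + (" " + _int_to_ro(rest) if rest else "")
--     return str(n)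
-- ===== SOURCE B (Python) =====
-- _UNITS = ["", "unu", "doi", "trei", "patru", "cinci", "sase", "sapte", "opt", "noua",
--           "zece", "unsprezece", "doisprezece", "treisprezece", "paisprezece", "cincisprezece",
--           "saisprezece", "saptesprezece", "optsprezece", "nouasprezece"]
--
-- _TENS = ["", "", "douazeci", "treizeci", "patruzeci", "cincizeci",
--          "saizeci", "saptezeci", "optzeci", "nouazeci"]
--
--
-- def _triple(m: int) -> str:
--     # words for one nonzero three-digit group, built without recursion
--     h, r = divmod(m, 100)
--     parts = []
--     if h:
--         parts.append("o suta" if h == 1 else _UNITS[h] + " sute")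
--     if r:
--         if r < 20:
--             parts.append(_UNITS[r])
--         else:
--             t, u = divmod(r, 10)
--             parts.append(_TENS[t] + (" si " + _UNITS[u] if u else ""))
--     return " ".join(parts)
--
--
-- def _int_to_ro(n: int) -> str:
--     if n == 0:
--         return "zero"
--     prefix = "minus " if n < 0 else ""
--     m = abs(n)
--     if m >= 1_000_000:
--         return prefix + str(m)
--     q, r = divmod(m, 1000)
--     words = []
--     if q:
--         words.append("o mie" if q == 1 else _triple(q) + " mii")
--     if r:
--         words.append(_triple(r))
--     return prefix + " ".join(words)
-- ===== Notes on version B (the rewrite author's own statement) =====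
-- stated objective: alternative
-- what changed: Replaces A's cross-scale recursion with a non-recursive three-digit group helper plus a group-wise composition ('o mie'/'mii' thousands group, then the remainder group) joined via ' '.join, so no recursive calls remain.
import Mathlib
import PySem

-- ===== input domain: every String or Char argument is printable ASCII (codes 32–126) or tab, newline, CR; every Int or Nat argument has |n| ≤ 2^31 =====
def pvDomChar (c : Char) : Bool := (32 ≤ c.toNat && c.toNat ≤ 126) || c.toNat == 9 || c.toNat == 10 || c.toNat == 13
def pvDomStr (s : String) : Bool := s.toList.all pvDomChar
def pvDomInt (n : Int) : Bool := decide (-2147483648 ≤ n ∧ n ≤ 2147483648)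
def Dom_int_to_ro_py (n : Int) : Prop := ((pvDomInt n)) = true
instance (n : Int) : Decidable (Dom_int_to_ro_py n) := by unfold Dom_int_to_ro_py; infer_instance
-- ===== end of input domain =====

-- B replaces A's cross-scale recursion by a non-recursive three-digit group helper composed group-wise (alternative decomposition, same cost).


-- ===== PORT A =====
def pyUNITS : List String := ["", "unu", "doi", "trei", "patru", "cinci", "sase", "sapte", "opt", "noua",
  "zece", "unsprezece", "doisprezece", "treisprezece", "paisprezece", "cincisprezece",
  "saisprezece", "saptesprezece", "optsprezece", "nouasprezece"]

def pyTENS : List String := ["", "", "douazeci", "treizeci", "patruzeci", "cincizeci",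
  "saizeci", "saptezeci", "optzeci", "nouazeci"]

-- body of _int_to_ro for nonnegative arguments (A's negative branch recurses once into -n ≥ 0)
def roNat (n : Nat) : String :=
  if n = 0 then "zero"
  else if n < 20 then pyUNITS.getD n ""
  else if n < 100 then
    let tens := pyTENS.getD (n / 10) ""
    let unit := pyUNITS.getD (n % 10) ""
    tens ++ (if unit ≠ "" then " si " ++ unit else "")
  else if n < 1000 then
    let hundreds := n / 100
    let rest := n % 100
    let h := if hundreds = 1 then "o suta" else pyUNITS.getD hundreds "" ++ " sute"
    h ++ (if rest ≠ 0 then " " ++ roNat rest else "")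
  else if n < 1000000 then
    let thousands := n / 1000
    let rest := n % 1000
    let t := if thousands = 1 then "o mie" else roNat thousands ++ " mii"
    t ++ (if rest ≠ 0 then " " ++ roNat rest else "")
  else PySem.Int.toStr (n : Int)
termination_by n
decreasing_by
  all_goals omega

def int_to_ro_py (n : Int) : String :=
  if n < 0 then "minus " ++ roNat (-n).toNat else roNat n.toNat

-- ===== PORT B =====
-- words for one nonzero three-digit group, built without recursion
def tripleNat (m : Nat) : String :=
  let h := m / 100
  let r := m % 100
  let parts : List String :=
    (if h ≠ 0 then [if h = 1 then "o suta" else pyUNITS.getD h "" ++ " sute"] else []) ++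
    (if r ≠ 0 then
      [if r < 20 then pyUNITS.getD r ""
       else
         let t := r / 10
         let u := r % 10
         pyTENS.getD t "" ++ (if u ≠ 0 then " si " ++ pyUNITS.getD u "" else "")]
     else [])
  PySem.Str.join " " parts

def int_to_ro_py_alt (n : Int) : String :=
  if n = 0 then "zero"
  else
    let pre := if n < 0 then "minus " else ""
    let m := n.natAbs
    if m ≥ 1000000 then pre ++ PySem.Int.toStr (m : Int)
    else
      let q := m / 1000
      let r := m % 1000
      let words : List String :=
        (if q ≠ 0 then [if q = 1 then "o mie" else tripleNat q ++ " mii"] else []) ++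
        (if r ≠ 0 then [tripleNat r] else [])
      pre ++ PySem.Str.join " " words

-- ===== PRECONDITION & SPEC =====
def Spec_int_to_ro_py (n : Int) (out : String) : Prop := out = int_to_ro_py_alt n
instance (n : Int) (out : String) : Decidable (Spec_int_to_ro_py n out) := by unfold Spec_int_to_ro_py; infer_instance

-- ===== CLAIM (what is proved, stated in full; the proofs are below) =====
def Claim_equal_int_to_ro_py : Prop := ∀ (n : Int), Dom_int_to_ro_py n → Spec_int_to_ro_py n (int_to_ro_py n)

-- ===== LEMMAS AND PROOFS =====

lemma join_singleton (x : String) : PySem.Str.join " " [x] = x := by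
  rw [← String.toList_inj]
  simp [PySem.Str.join, PySem.Chars.join_singleton]

lemma join_pair (x y : String) : PySem.Str.join " " [x, y] = x ++ " " ++ y := by
  rw [← String.toList_inj]
  simp [PySem.Str.join, PySem.Chars.join_cons_cons, PySem.Chars.join_singleton,
    String.toList_append]

-- the tens/units block shared by both programs
def subTT (r : Nat) : String :=
  if r < 20 then pyUNITS.getD r ""
  else pyTENS.getD (r / 10) "" ++ (if r % 10 ≠ 0 then " si " ++ pyUNITS.getD (r % 10) "" else "")

lemma units_empty_iff (u : Nat) (hu : u < 20) : (pyUNITS.getD u "" = "") ↔ u = 0 := by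
  interval_cases u <;> simp [pyUNITS]

lemma roNat_lt100 (r : Nat) (h1 : 1 ≤ r) (h2 : r < 100) : roNat r = subTT r := by
  rw [roNat, if_neg (by omega)]
  by_cases h : r < 20
  · rw [if_pos h]; rw [subTT, if_pos h]
  · rw [if_neg h, if_pos (by omega)]
    rw [subTT, if_neg h]
    simp only [ne_eq, units_empty_iff (r % 10) (by omega)]

lemma triple_eq (m : Nat) (h1 : 1 ≤ m) (h2 : m < 1000) : roNat m = tripleNat m := by
  by_cases hs : m < 100
  · have hd : m / 100 = 0 := Nat.div_eq_of_lt hs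
    have hm : m % 100 = m := Nat.mod_eq_of_lt hs
    have hm0 : ¬ m = 0 := by omega
    rw [roNat_lt100 m h1 hs, tripleNat]
    simp only [hd, hm, hm0, ne_eq, not_true_eq_false, not_false_eq_true, if_true, if_false,
      List.nil_append]
    rw [join_singleton]
    simp [subTT]
  · have hd0 : ¬ m / 100 = 0 := by omega
    rw [roNat, if_neg (by omega), if_neg (by omega), if_neg (by omega), if_pos h2, tripleNat]
    simp only [ne_eq, hd0, not_false_eq_true, if_true]
    by_cases hr : m % 100 = 0
    · simp only [hr, not_true_eq_false, if_false, List.append_nil]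
      rw [join_singleton, String.append_empty]
    · have hro := roNat_lt100 (m % 100) (by omega) (by omega)
      simp only [hr, not_false_eq_true, if_true, hro, List.singleton_append]
      rw [join_pair, String.append_assoc]
      simp [subTT]

lemma ro_pos (m : Nat) (h1 : 1 ≤ m) (h2 : m < 1000000) :
    roNat m =
      PySem.Str.join " "
        ((if m / 1000 ≠ 0 then [if m / 1000 = 1 then "o mie" else tripleNat (m / 1000) ++ " mii"] else []) ++
         (if m % 1000 ≠ 0 then [tripleNat (m % 1000)] else [])) := by
  by_cases hs : m < 1000
  · have hd : m / 1000 = 0 := Nat.div_eq_of_lt hs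
    have hm : m % 1000 = m := Nat.mod_eq_of_lt hs
    have hm0 : ¬ m = 0 := by omega
    rw [triple_eq m h1 hs]
    simp only [hd, hm, hm0, ne_eq, not_true_eq_false, not_false_eq_true, if_true, if_false,
      List.nil_append]
    rw [join_singleton]
  · have hd0 : ¬ m / 1000 = 0 := by omega
    rw [roNat, if_neg (by omega), if_neg (by omega), if_neg (by omega), if_neg (by omega),
      if_pos h2]
    have ht : roNat (m / 1000) = tripleNat (m / 1000) :=
      triple_eq (m / 1000) (by omega) (by omega)
    simp only [ne_eq, hd0, not_false_eq_true, if_true, ht]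
    by_cases hr : m % 1000 = 0
    · simp only [hr, not_true_eq_false, if_false, List.append_nil]
      rw [join_singleton, String.append_empty]
    · have hro := triple_eq (m % 1000) (by omega) (by omega)
      simp only [hr, not_false_eq_true, if_true, hro, List.singleton_append]
      rw [join_pair, String.append_assoc]

lemma ro_main (m : Nat) (h1 : 1 ≤ m) :
    roNat m =
      (if m ≥ 1000000 then PySem.Int.toStr (m : Int)
       else
         PySem.Str.join " "
           ((if m / 1000 ≠ 0 then [if m / 1000 = 1 then "o mie" else tripleNat (m / 1000) ++ " mii"] else []) ++
            (if m % 1000 ≠ 0 then [tripleNat (m % 1000)] else []))) := by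
  by_cases hb : m ≥ 1000000
  · rw [if_pos hb, roNat, if_neg (by omega), if_neg (by omega), if_neg (by omega),
      if_neg (by omega), if_neg (by omega)]
  · rw [if_neg hb, ro_pos m h1 (by omega)]

-- ===== VERDICT (by name: the statement is the Claim_ definition above) =====
theorem int_to_ro_py_spec : Claim_equal_int_to_ro_py := by
  intro n _
  unfold Spec_int_to_ro_py int_to_ro_py int_to_ro_py_alt
  rcases lt_trichotomy n 0 with hn | hn | hn
  · have habs : (-n).toNat = n.natAbs := by omega
    rw [if_pos hn, if_neg (by omega), habs]
    have h1 : 1 ≤ n.natAbs := by omega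
    rw [ro_main n.natAbs h1]
    simp only [ge_iff_le, if_pos hn]
    split <;> rfl
  · subst hn
    rw [if_neg (by omega : ¬ (0:Int) < 0), if_pos rfl, Int.toNat_zero, roNat]
    simp
  · have habs : n.toNat = n.natAbs := by omega
    rw [if_neg (by omega), if_neg (by omega), habs]
    have h1 : 1 ≤ n.natAbs := by omega
    rw [ro_main n.natAbs h1]
    simp only [ge_iff_le, if_neg (by omega : ¬ n < 0)]
    split <;> rw [String.empty_append]
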